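-- pv_equiv track=rewrite | github.com/jmnb-sdbg-edi/cardamom | ProdTests/perftests/cTools/src/python/stat/dstat.py | freqDistr
-- ===== SOURCE A (Python) =====
-- def freqDistr(L):
--     "Computes the frequency distribution for the element in L"
--     L.sort();
--     last = -L[0];
--     i = 0;
--     fd = [];
--     for x in L:
--         if x!= last:
--             fd.append([x, L.count(x)]);
--             i = i+1;
--         last = x;
--
--     return fd;
-- ===== SOURCE B (Python) =====
-- def freqDistr(L):
--     "Computes the frequency distribution for the element in L"
--     # Single pass of run-length counting over the sorted list (A rescans the
--     # whole list with L.count for every group).  Like A, sorts L in place.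
--     L.sort()
--     fd = []
--     for x in L:
--         if fd and fd[0][0] == x:
--             fd[0][1] += 1
--         else:
--             fd.insert(0, [x, 1])
--     return fd[::-1]
-- ===== Notes on version B (the rewrite author's own statement) =====
-- stated objective: faster
-- what changed: replaces the per-group full-list L.count rescan with one run-length counting pass over the sorted list (groups built front-to-back via the head, reversed at the end)
-- intended difference: On lists whose minimum element is 0 (0 in L and all elements nonnegative) A's sentinel last=-L[0] equals the first element, so A silently drops the group for 0; B returns the complete distribution including [0, count], which is the intended frequency distribution. — e.g. on freqDistr([0, 0, 1]): A returns [[1, 1]], B returns [[0, 2], [1, 1]]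
import Mathlib
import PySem

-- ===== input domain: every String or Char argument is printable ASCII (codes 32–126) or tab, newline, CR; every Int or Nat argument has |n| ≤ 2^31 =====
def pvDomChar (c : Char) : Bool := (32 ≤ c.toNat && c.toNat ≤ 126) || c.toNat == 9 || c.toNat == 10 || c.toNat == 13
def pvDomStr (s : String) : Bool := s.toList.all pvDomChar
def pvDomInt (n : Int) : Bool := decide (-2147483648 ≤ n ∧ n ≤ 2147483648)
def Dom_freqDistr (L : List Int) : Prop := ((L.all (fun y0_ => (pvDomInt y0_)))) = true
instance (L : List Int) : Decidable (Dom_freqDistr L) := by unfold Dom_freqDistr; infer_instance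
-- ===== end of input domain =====

-- B replaces A's per-group L.count rescan with one run-length counting pass over the
-- sorted list.  Both A and B sort L in place (side effect identical); the equivalence
-- proved here is about the RETURN value.

-- ===== PORT A =====
-- A's loop body: if x != last: fd.append([x, L.count(x)]); i += 1; last = x
def stepA (full : List Int) (st : Int × Int × List (List Int)) (x : Int) :
    Int × Int × List (List Int) :=
  if x ≠ st.1 then (x, st.2.1 + 1, st.2.2 ++ [[x, (PySem.List.count full x : Int)]])
  else (x, st.2.1, st.2.2)

def freqDistr (L : List Int) : List (List Int) :=
  let Ls := PySem.List.sorted L (fun x => x) false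
  let last0 : Int := -((PySem.List.pyGet? Ls 0).getD 0)   -- L[0]; IndexError on [] excluded by Pre_
  let st := Ls.foldl (stepA Ls) (last0, 0, [])
  st.2.2

-- ===== PORT B =====
-- B's loop body: if fd and fd[0][0] == x: fd[0][1] += 1 else: fd.insert(0, [x, 1])
def stepB (fd : List (List Int)) (x : Int) : List (List Int) :=
  match fd with
  | [x0, c] :: rest => if x0 = x then [x0, c + 1] :: rest else [x, 1] :: fd
  | _ => [x, 1] :: fd

def freqDistr_alt (L : List Int) : List (List Int) :=
  let Ls := PySem.List.sorted L (fun x => x) false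
  let fd := Ls.foldl stepB []
  fd.reverse

-- ===== PRECONDITION & SPEC =====
-- Pre_ excludes only the empty list, on which A raises IndexError at L[0].
def Pre_freqDistr (L : List Int) : Prop := L ≠ []
instance (L : List Int) : Decidable (Pre_freqDistr L) := by unfold Pre_freqDistr; infer_instance
def pvWitness_freqDistr : List Int := ([1, 2])

-- On lists whose minimum element is 0, A's sentinel last = -L[0] equals the first
-- element of the sorted list, so A silently drops the group for value 0; B returns the
-- complete distribution including [0, count], which is the intended value.
def D_freqDistr (L : List Int) : Prop := 0 ∈ L ∧ ∀ y ∈ L, 0 ≤ y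
instance (L : List Int) : Decidable (D_freqDistr L) := by unfold D_freqDistr; infer_instance
def Spec_freqDistr (L : List Int) (out : List (List Int)) : Prop :=
  ¬ D_freqDistr L → out = freqDistr_alt L
instance (L : List Int) (out : List (List Int)) : Decidable (Spec_freqDistr L out) := by
  unfold Spec_freqDistr; infer_instance
def pvDiffWitness_freqDistr : List Int := ([0, 0, 1])
def pvDiffWitnessOut_freqDistr : (List (List Int)) × (List (List Int)) :=
  ([[1, 1]], [[0, 2], [1, 1]])

-- ===== CLAIM (what is proved, stated in full; the proofs are below) =====
def Claim_unchanged_freqDistr : Prop :=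
  ∀ (L : List Int), Dom_freqDistr L → Pre_freqDistr L → Spec_freqDistr L (freqDistr L)
def Claim_changed_freqDistr : Prop :=
  Dom_freqDistr (pvDiffWitness_freqDistr) ∧ Pre_freqDistr (pvDiffWitness_freqDistr) ∧
  D_freqDistr (pvDiffWitness_freqDistr) ∧
  freqDistr (pvDiffWitness_freqDistr) = pvDiffWitnessOut_freqDistr.1 ∧
  freqDistr_alt (pvDiffWitness_freqDistr) = pvDiffWitnessOut_freqDistr.2 ∧
  pvDiffWitnessOut_freqDistr.1 ≠ pvDiffWitnessOut_freqDistr.2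
def Claim_exact_freqDistr : Prop :=
  ∀ (L : List Int), Dom_freqDistr L → Pre_freqDistr L → D_freqDistr L →
    freqDistr L ≠ freqDistr_alt L

-- ===== LEMMAS AND PROOFS =====

-- A's loop, as a recursion: skip while x = last, else emit [x, count full x].
def specA (full : List Int) : Int → List Int → List (List Int)
  | _, [] => []
  | last, x :: rest =>
    if x = last then specA full x rest
    else [x, (List.count x full : Int)] :: specA full x rest

-- B's loop, as a recursion: run-length merge with a pending group [x, c].
def mergeRun : Int → Int → List Int → List (List Int)
  | x, c, [] => [[x, c]]
  | x, c, y :: rest => if y = x then mergeRun x (c + 1) rest else [x, c] :: mergeRun y 1 rest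

theorem A_fold (full : List Int) :
    ∀ (S : List Int) (last i : Int) (fd : List (List Int)),
      (S.foldl (stepA full) (last, i, fd)).2.2 = fd ++ specA full last S := by
  intro S
  induction S with
  | nil => intro last i fd; simp [specA]
  | cons x rest ih =>
    intro last i fd
    rw [List.foldl_cons]
    by_cases h : x = last
    · rw [show stepA full (last, i, fd) x = (x, i, fd) from by simp [stepA, h]]
      rw [ih, specA, if_pos h]
    · rw [show stepA full (last, i, fd) x
          = (x, i + 1, fd ++ [[x, (List.count x full : Int)]]) from by simp [stepA, h]]
      rw [ih, specA, if_neg h]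
      simp

theorem B_fold :
    ∀ (S : List Int) (x c : Int) (acc : List (List Int)),
      (S.foldl stepB ([x, c] :: acc)).reverse = acc.reverse ++ mergeRun x c S := by
  intro S
  induction S with
  | nil => intro x c acc; simp [mergeRun]
  | cons y rest ih =>
    intro x c acc
    rw [List.foldl_cons]
    by_cases h : x = y
    · rw [show stepB ([x, c] :: acc) y = [x, c + 1] :: acc from by simp [stepB, h]]
      rw [ih, mergeRun, if_pos h.symm]
    · rw [show stepB ([x, c] :: acc) y = [y, 1] :: [x, c] :: acc from by simp [stepB, h]]
      rw [ih, mergeRun, if_neg (fun e => h e.symm)]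
      simp

theorem countc (a b : Int) (l : List Int) :
    List.count a (b :: l) = List.count a l + (if a = b then 1 else 0) := by
  by_cases h : a = b
  · subst h; simp
  · simp [h, eq_comm]

-- Core: on a sorted tail, B's pending-group merge equals [x, count full x] :: A's tail,
-- provided full's counts relate to the tail's as stated.
theorem merge_spec :
    ∀ (rest : List Int) (x c : Int) (full : List Int),
      (x :: rest).Pairwise (· ≤ ·) →
      (List.count x full : Int) = c + (List.count x rest : Int) →
      (∀ y, x < y → List.count y full = List.count y rest) →
      mergeRun x c rest = [x, (List.count x full : Int)] :: specA full x rest := by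
  intro rest
  induction rest with
  | nil =>
    intro x c full _ hc _
    simp [List.count_nil] at hc
    simp [mergeRun, specA, hc]
  | cons z rest' ih =>
    intro x c full hp hc hgt
    have hpz : (z :: rest').Pairwise (· ≤ ·) := hp.sublist (by simp)
    by_cases hz : z = x
    · subst hz
      simp only [mergeRun, specA]
      apply ih z (c + 1) full hpz
      · rw [countc] at hc; simp at hc; omega
      · intro y hy
        have h1 := hgt y hy
        rw [countc] at h1
        have hne : ¬ y = z := by omega
        simp [hne] at h1
        exact h1
    · have hxz : x ≤ z := (List.pairwise_cons.mp hp).1 z (by simp)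
      have hlt : x < z := lt_of_le_of_ne hxz (fun e => hz e.symm)
      have hnm : x ∉ z :: rest' := by
        intro hmem
        rcases List.mem_cons.mp hmem with h | h
        · omega
        · have := (List.pairwise_cons.mp hpz).1 x h
          omega
      have hcx : (List.count x full : Int) = c := by
        rw [List.count_eq_zero.mpr hnm] at hc
        simpa using hc
      simp only [mergeRun, specA, if_neg hz]
      rw [hcx]
      congr 1
      apply ih z 1 full hpz
      · have h1 := hgt z hlt
        rw [countc] at h1
        simp at h1
        omega
      · intro y hy
        have h1 := hgt y (by omega)
        rw [countc] at h1
        have hne : ¬ y = z := by omega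
        simp [hne] at h1
        exact h1

-- The core instantiated at full = x :: rest (the whole sorted list).
theorem core (x : Int) (rest : List Int) (hp : (x :: rest).Pairwise (· ≤ ·)) :
    mergeRun x 1 rest
      = [x, (List.count x (x :: rest) : Int)] :: specA (x :: rest) x rest := by
  apply merge_spec rest x 1 (x :: rest) hp
  · rw [countc]; simp; omega
  · intro y hy
    rw [countc]
    have hne : ¬ y = x := by omega
    simp [hne]

theorem A_eval (L : List Int) (x : Int) (rest : List Int)
    (hS : PySem.List.sorted L (fun x => x) false = x :: rest) :
    freqDistr L = specA (x :: rest) (-x) (x :: rest) := by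
  unfold freqDistr
  rw [hS]
  rw [A_fold (x :: rest) (x :: rest) (-((PySem.List.pyGet? (x :: rest) 0).getD 0)) 0 []]
  simp [PySem.List.pyGet?, PySem.List.pyIdx?]

theorem B_eval (L : List Int) (x : Int) (rest : List Int)
    (hS : PySem.List.sorted L (fun x => x) false = x :: rest) :
    freqDistr_alt L = mergeRun x 1 rest := by
  unfold freqDistr_alt
  rw [hS]
  have := B_fold rest x 1 []
  simp [List.foldl] at this ⊢
  exact this

-- The head of the sorted list is 0 exactly on D_.
theorem head_zero_iff (L : List Int) (x : Int) (rest : List Int)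
    (hS : PySem.List.sorted L (fun x => x) false = x :: rest) :
    x = 0 ↔ D_freqDistr L := by
  have hmemx : x ∈ L := by
    have : x ∈ PySem.List.sorted L (fun x => x) false := by rw [hS]; simp
    exact (PySem.List.mem_sorted _ _ _ _).mp this
  have hmin : ∀ y ∈ L, x ≤ y := PySem.List.key_head_sorted_le L (fun x => x) hS
  constructor
  · intro hx
    subst hx
    exact ⟨hmemx, fun y hy => hmin y hy⟩
  · rintro ⟨h0, hnn⟩
    have h1 := hmin 0 h0
    have h2 := hnn x hmemx
    omega

theorem main_split (L : List Int) (hL : L ≠ []) :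
    (¬ D_freqDistr L → freqDistr L = freqDistr_alt L) ∧
    (D_freqDistr L → freqDistr_alt L
        = [0, (List.count 0 (PySem.List.sorted L (fun x => x) false) : Int)]
            :: freqDistr L) := by
  obtain ⟨x, rest, hS⟩ : ∃ x rest, PySem.List.sorted L (fun x => x) false = x :: rest := by
    cases h : PySem.List.sorted L (fun x => x) false with
    | nil => exact absurd ((PySem.List.sorted_eq_nil_iff _ _ _).mp h) hL
    | cons a t => exact ⟨a, t, rfl⟩
  have hp : (x :: rest).Pairwise (· ≤ ·) := by
    have := PySem.List.sorted_pairwise L (fun x => x)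
    rw [hS] at this
    exact this
  have hA := A_eval L x rest hS
  have hB := B_eval L x rest hS
  rw [core x rest hp] at hB
  constructor
  · intro hD
    have hx : x ≠ 0 := fun e => hD ((head_zero_iff L x rest hS).mp e)
    have hxne : ¬ x = -x := by omega
    rw [hA, hB]
    simp only [specA, if_neg hxne]
  · intro hD
    have hx : x = 0 := by
      by_contra hx
      exact hx (by
        have := (head_zero_iff L x rest hS).mpr hD
        exact this)
    subst hx
    have : (0 : Int) = -0 := by norm_num
    rw [hA, hB, hS]
    simp [specA]

-- ===== VERDICT (by name: the statement is the Claim_ definition above) =====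
theorem freqDistr_spec : Claim_unchanged_freqDistr := by
  intro L _ hPre hD
  exact ((main_split L hPre).1 hD).symm ▸ rfl

theorem freqDistr_changed : Claim_changed_freqDistr := by
  unfold Claim_changed_freqDistr; decide

theorem freqDistr_tight : Claim_exact_freqDistr := by
  intro L _ hPre hD heq
  have h := (main_split L hPre).2 hD
  rw [← heq] at h
  have := congrArg List.length h
  simp at this
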